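-- pv_equiv track=rewrite | github.com/Collapseyu/LeetCode | Median/o13/ot13.py | judge_method
-- ===== SOURCE A (Python) =====
-- def judge_method(x,y,k):
--     res = 0
--     while(x > 0):
--         res += x%10
--         x //= 10
--     while(y > 0):
--         res += y%10
--         y //= 10
--     if res > k:
--         return False
--     else:
--         return True
-- ===== SOURCE B (Python) =====
-- def judge_method(x, y, k):
--     total = (sum(int(c) for c in str(x)) if x > 0 else 0) \
--           + (sum(int(c) for c in str(y)) if y > 0 else 0)
--     return total <= k
-- ===== Notes on version B (the rewrite author's own statement) =====
-- stated objective: idiomatic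
-- what changed: Replaces the two remainder/floor-division while-loops and the if/else return with a direct sum of the decimal-string digits of each positive argument and a single comparison 'total <= k'.
import Mathlib
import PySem

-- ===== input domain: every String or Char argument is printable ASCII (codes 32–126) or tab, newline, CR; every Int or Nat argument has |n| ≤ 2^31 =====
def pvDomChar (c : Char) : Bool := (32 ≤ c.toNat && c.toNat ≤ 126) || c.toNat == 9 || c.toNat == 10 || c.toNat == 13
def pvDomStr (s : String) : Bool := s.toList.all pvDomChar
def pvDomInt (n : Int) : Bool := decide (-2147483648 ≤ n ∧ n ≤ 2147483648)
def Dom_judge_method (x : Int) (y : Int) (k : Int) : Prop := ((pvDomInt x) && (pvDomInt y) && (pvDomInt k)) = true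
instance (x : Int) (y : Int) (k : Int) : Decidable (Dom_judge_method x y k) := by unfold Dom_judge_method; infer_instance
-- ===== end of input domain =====

-- B replaces A's remainder/floor-division while-loops by summing the decimal-string
-- digits of each positive argument and returning 'total <= k' directly (idiomatic).

-- ===== PORT A =====
-- the two while-loops of A, threading the shared accumulator res
def judgeLoop (x : Int) (res : Int) : Int :=
  if _h : x > 0 then
    judgeLoop (PySem.Int.floordiv x 10) (res + PySem.Int.mod x 10)
  else res
termination_by x.toNat
decreasing_by
  simp only [PySem.Int.floordiv]
  rw [Int.fdiv_eq_ediv_of_nonneg x (by norm_num)]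
  omega

def judge_method (x : Int) (y : Int) (k : Int) : Bool :=
  let res := judgeLoop x 0
  let res := judgeLoop y res
  if res > k then false else true

-- ===== PORT B =====
-- int(c) on a decimal digit character c is exactly c.toNat - 48 (exact on '0'..'9',
-- the only characters str produces for a positive int)
def digitCharsSum (cs : List Char) : Int :=
  cs.foldl (fun a c => a + ((c.toNat : Int) - 48)) 0

def judge_method_alt (x : Int) (y : Int) (k : Int) : Bool :=
  let total := (if x > 0 then digitCharsSum (PySem.Int.toChars x) else 0)
             + (if y > 0 then digitCharsSum (PySem.Int.toChars y) else 0)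
  decide (total ≤ k)

-- ===== PRECONDITION & SPEC =====
def Spec_judge_method (x : Int) (y : Int) (k : Int) (out : Bool) : Prop := out = judge_method_alt x y k
instance (x : Int) (y : Int) (k : Int) (out : Bool) : Decidable (Spec_judge_method x y k out) := by unfold Spec_judge_method; infer_instance

-- ===== CLAIM (what is proved, stated in full; the proofs are below) =====
def Claim_equal_judge_method : Prop := ∀ (x : Int) (y : Int) (k : Int), Dom_judge_method x y k → Spec_judge_method x y k (judge_method x y k)

-- ===== LEMMAS AND PROOFS =====

-- digit sum of a natural number by repeated division
def natDsum (n : Nat) : Int :=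
  if n = 0 then 0 else (n % 10 : Nat) + natDsum (n / 10)

theorem digitCharsSum_foldl (l : List Char) (a : Int) :
    l.foldl (fun a c => a + ((c.toNat : Int) - 48)) a = a + digitCharsSum l := by
  induction l generalizing a with
  | nil => simp [digitCharsSum]
  | cons c t ih =>
    simp only [digitCharsSum, List.foldl_cons] at *
    rw [ih, ih (0 + _)]
    ring

theorem digitCharsSum_cons (c : Char) (l : List Char) :
    digitCharsSum (c :: l) = ((c.toNat : Int) - 48) + digitCharsSum l := by
  simp only [digitCharsSum, List.foldl_cons]
  rw [digitCharsSum_foldl]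
  simp [digitCharsSum]

theorem digitChar_val (d : Nat) (h : d < 10) :
    ((Nat.digitChar d).toNat : Int) - 48 = (d : Int) := by
  interval_cases d <;> decide

theorem natDsum_of_div_zero (n : Nat) (h0 : n / 10 = 0) :
    natDsum n = ((n % 10 : Nat) : Int) := by
  rw [natDsum]
  split_ifs with hn
  · subst hn; simp
  · rw [h0, natDsum]
    simp

theorem toDigitsCore_sum (f : Nat) : ∀ (n : Nat) (l : List Char), n < 10 ^ f →
    digitCharsSum (Nat.toDigitsCore 10 f n l) = natDsum n + digitCharsSum l := by
  induction f with
  | zero =>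
    intro n l h
    have hn : n = 0 := by simpa using h
    subst hn
    rw [show Nat.toDigitsCore 10 0 0 l = l from rfl, natDsum]
    norm_num
  | succ f ih =>
    intro n l h
    rw [Nat.toDigitsCore]
    by_cases h0 : n / 10 = 0
    · rw [if_pos h0, digitCharsSum_cons, digitChar_val _ (Nat.mod_lt _ (by norm_num)),
        natDsum_of_div_zero n h0]
    · rw [if_neg h0, ih _ _ (by rw [pow_succ] at h; omega)]
      rw [digitCharsSum_cons, digitChar_val _ (Nat.mod_lt _ (by norm_num))]
      conv_rhs => rw [natDsum]
      rw [if_neg (by omega)]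
      push_cast
      ring

theorem toChars_sum (x : Int) (hx : 0 < x) :
    digitCharsSum (PySem.Int.toChars x) = natDsum x.toNat := by
  rw [PySem.Int.toChars, if_neg (by omega), Nat.toDigits]
  have hlt : x.toNat < 10 ^ (x.toNat + 1) :=
    lt_of_lt_of_le (Nat.lt_pow_self (by norm_num))
      (Nat.pow_le_pow_right (by norm_num) (Nat.le_succ _))
  rw [toDigitsCore_sum _ _ _ hlt]
  simp [digitCharsSum]

theorem judgeLoop_eq_aux (n : Nat) : ∀ (x res : Int), x.toNat = n →
    judgeLoop x res = res + natDsum x.toNat := by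
  induction n using Nat.strong_induction_on with
  | _ n ih =>
    intro x res hxn
    rw [judgeLoop]
    split_ifs with h
    · have hdiv : PySem.Int.floordiv x 10 = x / 10 := by
        simp only [PySem.Int.floordiv]
        exact Int.fdiv_eq_ediv_of_nonneg x (by norm_num)
      have hmod : PySem.Int.mod x 10 = x % 10 := by
        simp [PySem.Int.mod, Int.fmod_eq_emod]
      rw [hdiv, hmod, ih ((x / 10).toNat) (by omega) _ _ rfl]
      conv_rhs => rw [natDsum]
      rw [if_neg (by omega)]
      have h1 : (x / 10).toNat = x.toNat / 10 := by omega
      have h2 : ((x.toNat % 10 : Nat) : Int) = x % 10 := by omega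
      rw [h1, h2]
      ring
    · have h0 : x.toNat = 0 := by omega
      rw [h0, natDsum]
      simp

theorem judgeLoop_eq (x : Int) (res : Int) : judgeLoop x res = res + natDsum x.toNat :=
  judgeLoop_eq_aux x.toNat x res rfl

-- ===== VERDICT (by name: the statement is the Claim_ definition above) =====
theorem judge_method_spec : Claim_equal_judge_method := by
  intro x y k _
  unfold Spec_judge_method judge_method judge_method_alt
  simp only [judgeLoop_eq]
  have hx : (if x > 0 then digitCharsSum (PySem.Int.toChars x) else 0) = natDsum x.toNat := by
    split_ifs with h
    · exact toChars_sum x h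
    · have : x.toNat = 0 := by omega
      rw [this, natDsum]; simp
  have hy : (if y > 0 then digitCharsSum (PySem.Int.toChars y) else 0) = natDsum y.toNat := by
    split_ifs with h
    · exact toChars_sum y h
    · have : y.toNat = 0 := by omega
      rw [this, natDsum]; simp
  rw [hx, hy]
  by_cases hk : 0 + natDsum x.toNat + natDsum y.toNat > k
  · rw [if_pos hk]
    simp only [zero_add] at hk ⊢
    simp [decide_eq_false (by omega : ¬ (natDsum x.toNat + natDsum y.toNat ≤ k))]
  · rw [if_neg hk]
    simp only [zero_add] at hk ⊢
    simp [decide_eq_true (by omega : natDsum x.toNat + natDsum y.toNat ≤ k)]
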